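-- pv_equiv track=rewrite | github.com/MRSugara/highlighter | app/services/highlight_ai.py | _emotional_signal_score
-- ===== SOURCE A (Python) =====
-- from typing import List, Dict, Tuple, Optional
--
-- def _tokenize(text: str) -> List[str]:
--   # Simple, library-free tokenizer
--   cleaned = []
--   for ch in text.lower():
--     if ch.isalnum() or ch in {" ", "-"}:
--       cleaned.append(ch)
--     else:
--       cleaned.append(" ")
--   return [w for w in "".join(cleaned).split() if w]
--
-- def _emotional_signal_score(text: str) -> Tuple[int, List[str]]:
--   """Detect emotional signals in text.
--
--   Editorial: Emotional content often makes compelling clips.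
--   Keep lexicon small and high-precision.
--   """
--   words = _tokenize(text)
--   if not words:
--     return 0, []
--
--   # Emotion lexicon: keep small, high-precision.
--   fear_urgency = {
--     "takut", "khawatir", "cemas", "panik", "bahaya", "ancam", "darurat", "segera", "urgent", "krusial",
--     "parah", "fatal", "berisiko", "resiko", "hancur",
--   }
--   success_relief = {
--     "berhasil", "sukses", "menang", "naik", "tembus", "lega", "akhirnya", "tenang", "selamat",
--   }
--   failure_frustration = {
--     "gagal", "kecewa", "frustrasi", "capek", "lelah", "stress", "stres", "marah", "kesal", "kacau",
--     "susah", "sulit", "berantakan", "nyesel", "menyerah",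
--   }
--
--   score = 0
--   reasons: List[str] = []
--
--   if any(w in fear_urgency for w in words):
--     score += 2
--     reasons.append("Sinyal urgensi/risiko")
--   if any(w in success_relief for w in words):
--     score += 1
--     reasons.append("Sinyal sukses/lega")
--   if any(w in failure_frustration for w in words):
--     score += 1
--     reasons.append("Sinyal gagal/frustrasi")
--
--   # Exclamation often indicates emphasis (but keep small)
--   if "!" in text:
--     score += 1
--     reasons.append("Penekanan emosional")
--
--   return score, reasons
-- ===== SOURCE B (Python) =====
-- from typing import List, Tuple
--
-- def _tokenize(text: str) -> List[str]:
--   cleaned = []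
--   for ch in text.lower():
--     if ch.isalnum() or ch in {" ", "-"}:
--       cleaned.append(ch)
--     else:
--       cleaned.append(" ")
--   return [w for w in "".join(cleaned).split() if w]
--
-- # One merged word -> category index, built once from the three lexicons.
-- _CATEGORY = {
--   "takut": "fear", "khawatir": "fear", "cemas": "fear", "panik": "fear", "bahaya": "fear",
--   "ancam": "fear", "darurat": "fear", "segera": "fear", "urgent": "fear", "krusial": "fear",
--   "parah": "fear", "fatal": "fear", "berisiko": "fear", "resiko": "fear", "hancur": "fear",
--   "berhasil": "success", "sukses": "success", "menang": "success", "naik": "success",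
--   "tembus": "success", "lega": "success", "akhirnya": "success", "tenang": "success", "selamat": "success",
--   "gagal": "failure", "kecewa": "failure", "frustrasi": "failure", "capek": "failure", "lelah": "failure",
--   "stress": "failure", "stres": "failure", "marah": "failure", "kesal": "failure", "kacau": "failure",
--   "susah": "failure", "sulit": "failure", "berantakan": "failure", "nyesel": "failure", "menyerah": "failure",
-- }
--
-- def _emotional_signal_score(text: str) -> Tuple[int, List[str]]:
--   words = _tokenize(text)
--   if not words:
--     return 0, []
--
--   found_fear = found_success = found_failure = False
--   for w in words:  # single pass over the words, one dict lookup each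
--     c = _CATEGORY.get(w)
--     if c == "fear":
--       found_fear = True
--     elif c == "success":
--       found_success = True
--     elif c == "failure":
--       found_failure = True
--
--   entries = [
--     (found_fear, 2, "Sinyal urgensi/risiko"),
--     (found_success, 1, "Sinyal sukses/lega"),
--     (found_failure, 1, "Sinyal gagal/frustrasi"),
--     ("!" in text, 1, "Penekanan emosional"),
--   ]
--   score = sum(p for f, p, _ in entries if f)
--   reasons = [r for f, _, r in entries if f]
--   return score, reasons
-- ===== Notes on version B (the rewrite author's own statement) =====
-- stated objective: alternative
-- what changed: Replaces the three separate any()-scans over the token list with one merged word->category dict built once and a single pass setting three flags, and builds score/reasons from a (flag, points, reason) table instead of sequential if-blocks.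
import Mathlib
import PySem

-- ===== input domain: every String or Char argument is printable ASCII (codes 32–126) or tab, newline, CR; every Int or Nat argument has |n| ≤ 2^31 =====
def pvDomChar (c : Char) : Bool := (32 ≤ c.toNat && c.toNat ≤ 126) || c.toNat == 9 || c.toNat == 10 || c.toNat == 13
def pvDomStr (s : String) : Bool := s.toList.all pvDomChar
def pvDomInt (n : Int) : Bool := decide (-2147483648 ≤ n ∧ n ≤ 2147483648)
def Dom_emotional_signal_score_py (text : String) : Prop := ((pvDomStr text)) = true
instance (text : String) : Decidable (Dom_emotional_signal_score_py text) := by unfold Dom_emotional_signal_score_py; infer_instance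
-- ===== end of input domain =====

-- B replaces A's three repeated any()-scans by one merged word->category index and a single
-- pass setting three flags, then emits score/reasons from a fixed table (alternative, same cost).
-- ===== PORT A =====
-- shared module helper _tokenize (both Pythons call the identical helper)
def tokenize_py (text : String) : List String :=
  let cleaned : List Char :=
    (PySem.Str.lower text).toList.foldl
      (fun acc ch =>
        if PySem.Chars.isalnum ch || (ch == ' ' || ch == '-') then acc ++ [ch]
        else acc ++ [' ']) []
  (PySem.Str.split₀ (String.ofList cleaned)).filter (fun w => !(w == ""))

def emotional_signal_score_py (text : String) : Int × List String :=
  let words := tokenize_py text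
  if words.isEmpty then (0, [])
  else
    let fear_urgency : PySem.Set String := PySem.Set.ofList
      ["takut", "khawatir", "cemas", "panik", "bahaya", "ancam", "darurat", "segera", "urgent",
       "krusial", "parah", "fatal", "berisiko", "resiko", "hancur"]
    let success_relief : PySem.Set String := PySem.Set.ofList
      ["berhasil", "sukses", "menang", "naik", "tembus", "lega", "akhirnya", "tenang", "selamat"]
    let failure_frustration : PySem.Set String := PySem.Set.ofList
      ["gagal", "kecewa", "frustrasi", "capek", "lelah", "stress", "stres", "marah", "kesal",
       "kacau", "susah", "sulit", "berantakan", "nyesel", "menyerah"]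
    let score : Int := 0
    let reasons : List String := []
    let sr : Int × List String :=
      if words.any (fun w => fear_urgency.contains w) then
        (score + 2, reasons ++ ["Sinyal urgensi/risiko"]) else (score, reasons)
    let sr : Int × List String :=
      if words.any (fun w => success_relief.contains w) then
        (sr.1 + 1, sr.2 ++ ["Sinyal sukses/lega"]) else sr
    let sr : Int × List String :=
      if words.any (fun w => failure_frustration.contains w) then
        (sr.1 + 1, sr.2 ++ ["Sinyal gagal/frustrasi"]) else sr
    if PySem.Str.isIn "!" text then (sr.1 + 1, sr.2 ++ ["Penekanan emosional"]) else sr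

-- ===== PORT B =====
def catDict : PySem.Dict String String := PySem.Dict.mk
  [("takut", "fear"), ("khawatir", "fear"), ("cemas", "fear"), ("panik", "fear"), ("bahaya", "fear"),
   ("ancam", "fear"), ("darurat", "fear"), ("segera", "fear"), ("urgent", "fear"), ("krusial", "fear"),
   ("parah", "fear"), ("fatal", "fear"), ("berisiko", "fear"), ("resiko", "fear"), ("hancur", "fear"),
   ("berhasil", "success"), ("sukses", "success"), ("menang", "success"), ("naik", "success"),
   ("tembus", "success"), ("lega", "success"), ("akhirnya", "success"), ("tenang", "success"),
   ("selamat", "success"),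
   ("gagal", "failure"), ("kecewa", "failure"), ("frustrasi", "failure"), ("capek", "failure"),
   ("lelah", "failure"), ("stress", "failure"), ("stres", "failure"), ("marah", "failure"),
   ("kesal", "failure"), ("kacau", "failure"), ("susah", "failure"), ("sulit", "failure"),
   ("berantakan", "failure"), ("nyesel", "failure"), ("menyerah", "failure")]

def emotional_signal_score_py_alt (text : String) : Int × List String :=
  let words := tokenize_py text
  if words.isEmpty then (0, [])
  else
    let flags : Bool × Bool × Bool := words.foldl
      (fun (t : Bool × Bool × Bool) w =>
        let c := catDict.get? w
        if c == some "fear" then (true, t.2.1, t.2.2)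
        else if c == some "success" then (t.1, true, t.2.2)
        else if c == some "failure" then (t.1, t.2.1, true)
        else t)
      (false, false, false)
    let entries : List (Bool × Int × String) :=
      [(flags.1, 2, "Sinyal urgensi/risiko"),
       (flags.2.1, 1, "Sinyal sukses/lega"),
       (flags.2.2, 1, "Sinyal gagal/frustrasi"),
       (PySem.Str.isIn "!" text, 1, "Penekanan emosional")]
    (((entries.filter (fun e => e.1)).map (fun e => e.2.1)).sum,
     (entries.filter (fun e => e.1)).map (fun e => e.2.2))

-- ===== PRECONDITION & SPEC =====
def Spec_emotional_signal_score_py (text : String) (out : Int × List String) : Prop := out = emotional_signal_score_py_alt text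
instance (text : String) (out : Int × List String) : Decidable (Spec_emotional_signal_score_py text out) := by unfold Spec_emotional_signal_score_py; infer_instance

-- ===== CLAIM (what is proved, stated in full; the proofs are below) =====
def Claim_equal_emotional_signal_score_py : Prop := ∀ (text : String), Dom_emotional_signal_score_py text → Spec_emotional_signal_score_py text (emotional_signal_score_py text)

-- ===== LEMMAS AND PROOFS =====
def fearL : List String :=
  ["takut", "khawatir", "cemas", "panik", "bahaya", "ancam", "darurat", "segera", "urgent",
   "krusial", "parah", "fatal", "berisiko", "resiko", "hancur"]
def succL : List String :=
  ["berhasil", "sukses", "menang", "naik", "tembus", "lega", "akhirnya", "tenang", "selamat"]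
def failL : List String :=
  ["gagal", "kecewa", "frustrasi", "capek", "lelah", "stress", "stres", "marah", "kesal",
   "kacau", "susah", "sulit", "berantakan", "nyesel", "menyerah"]

-- first-match lookup in a block of constant-valued keys
lemma get?_const (ks : List String) (v : String) (rest : List (String × String)) (w : String) :
    (PySem.Dict.mk (ks.map (fun k => (k, v)) ++ rest)).get? w
      = if ks.contains w then some v else (PySem.Dict.mk rest).get? w := by
  induction ks with
  | nil => simp
  | cons k ks ih =>
    simp only [List.map_cons, List.cons_append, PySem.Dict.get?_mk_cons, ih]
    by_cases hk : k = w
    · simp [hk]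
    · simp [hk, Ne.symm hk]

lemma get_cat (w : String) :
    catDict.get? w =
      if fearL.contains w then some "fear"
      else if succL.contains w then some "success"
      else if failL.contains w then some "failure" else none := by
  have h : catDict = PySem.Dict.mk
      (fearL.map (fun k => (k, "fear")) ++
        (succL.map (fun k => (k, "success")) ++
          (failL.map (fun k => (k, "failure")) ++ []))) := by rfl
  rw [h, get?_const, get?_const, get?_const]
  have hnil : (PySem.Dict.mk ([] : List (String × String))).get? w = none := rfl
  simp [hnil]

lemma fear_not (w : String) (h : w ∈ fearL) : w ∉ succL ∧ w ∉ failL := by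
  fin_cases h <;> decide

lemma succ_not (w : String) (h : w ∈ succL) : w ∉ failL := by
  fin_cases h <;> decide

lemma step_eq (t : Bool × Bool × Bool) (w : String) :
    (let c := catDict.get? w
     if c == some "fear" then (true, t.2.1, t.2.2)
     else if c == some "success" then (t.1, true, t.2.2)
     else if c == some "failure" then (t.1, t.2.1, true)
     else t)
    = (t.1 || fearL.contains w, t.2.1 || succL.contains w, t.2.2 || failL.contains w) := by
  simp only [get_cat]
  by_cases h1 : w ∈ fearL
  · obtain ⟨hs, hl⟩ := fear_not w h1
    simp [h1, hs, hl]
  · by_cases h2 : w ∈ succL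
    · have hl := succ_not w h2
      simp [h1, h2, hl]
    · by_cases h3 : w ∈ failL <;>
        simp [h1, h2, h3]

lemma fold_or (ws : List String) (t : Bool × Bool × Bool) (f g h : String → Bool) :
    ws.foldl (fun t w => (t.1 || f w, t.2.1 || g w, t.2.2 || h w)) t
      = (t.1 || ws.any f, t.2.1 || ws.any g, t.2.2 || ws.any h) := by
  induction ws generalizing t with
  | nil => simp
  | cons w ws ih => simp [ih, Bool.or_assoc]

lemma fold_flags (ws : List String) (t : Bool × Bool × Bool) :
    ws.foldl
      (fun (t : Bool × Bool × Bool) w =>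
        let c := catDict.get? w
        if c == some "fear" then (true, t.2.1, t.2.2)
        else if c == some "success" then (t.1, true, t.2.2)
        else if c == some "failure" then (t.1, t.2.1, true)
        else t) t
    = (t.1 || ws.any (fun w => fearL.contains w),
       t.2.1 || ws.any (fun w => succL.contains w),
       t.2.2 || ws.any (fun w => failL.contains w)) := by
  have hfun : (fun (t : Bool × Bool × Bool) (w : String) =>
      let c := catDict.get? w
      if c == some "fear" then (true, t.2.1, t.2.2)
      else if c == some "success" then (t.1, true, t.2.2)
      else if c == some "failure" then (t.1, t.2.1, true)
      else t)
      = (fun (t : Bool × Bool × Bool) w =>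
          (t.1 || fearL.contains w, t.2.1 || succL.contains w, t.2.2 || failL.contains w)) := by
    funext t w; exact step_eq t w
  rw [hfun, fold_or]

-- ===== VERDICT (by name: the statement is the Claim_ definition above) =====
set_option maxHeartbeats 1000000 in
theorem emotional_signal_score_py_spec : Claim_equal_emotional_signal_score_py := by
  intro text _
  unfold Spec_emotional_signal_score_py emotional_signal_score_py emotional_signal_score_py_alt
  by_cases h : (tokenize_py text).isEmpty
  · simp [h]
  · have hofF : PySem.Set.ofList fearL = fearL := by
      apply PySem.Set.ofList_eq_self_of_nodup; decide
    have hofS : PySem.Set.ofList succL = succL := by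
      apply PySem.Set.ofList_eq_self_of_nodup; decide
    have hofL : PySem.Set.ofList failL = failL := by
      apply PySem.Set.ofList_eq_self_of_nodup; decide
    simp only [h, fold_flags, Bool.false_or,
      show PySem.Set.ofList ["takut", "khawatir", "cemas", "panik", "bahaya", "ancam", "darurat",
        "segera", "urgent", "krusial", "parah", "fatal", "berisiko", "resiko", "hancur"] = fearL
        from hofF,
      show PySem.Set.ofList ["berhasil", "sukses", "menang", "naik", "tembus", "lega",
        "akhirnya", "tenang", "selamat"] = succL from hofS,
      show PySem.Set.ofList ["gagal", "kecewa", "frustrasi", "capek", "lelah", "stress", "stres",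
        "marah", "kesal", "kacau", "susah", "sulit", "berantakan", "nyesel", "menyerah"] = failL
        from hofL, PySem.Set.contains_eq_listContains]
    cases hF : (tokenize_py text).any (fun w => fearL.contains w) <;>
    cases hS : (tokenize_py text).any (fun w => succL.contains w) <;>
    cases hL : (tokenize_py text).any (fun w => failL.contains w) <;>
    cases hE : PySem.Str.isIn "!" text <;>
      simp_all
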